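-- pv_equiv track=rewrite | github.com/argonaultes-public/epsi-poo-b3-paris | piece_of_cake.py | piece_of_cake
-- ===== SOURCE A (Python) =====
-- def piece_of_cake(cake):
--
--     # prendre pour référence le 1er caractère - 1 m&ms par part
--     for size_slice_ref in range(1, len(cake)):
--         isvalid = True
--
--         slice_ref = cake[0:size_slice_ref] #part de taille 1
--
--         # comparer avec tous les autres caractères
--
--         for slice_idx in range(0, len(cake), size_slice_ref):
--         # si j'ai une différence, alors il faut augmenter le nombre de mms - augmenter la taille de la part
--             if slice_ref != cake[slice_idx:slice_idx + size_slice_ref]: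
--                 isvalid = False
--         if isvalid:
--             return int(len(cake) / size_slice_ref)
--     # si j'ai pas de différence, que j'arrive au bout de la chaine de caractère, le nombre de mms, la taille de la part est valide
--     return 1
-- ===== SOURCE B (Python) =====
-- def piece_of_cake(cake):
--     # Try only divisors of len(cake), smallest first: the first divisor d for
--     # which the whole cake is the prefix of length d repeated gives the answer.
--     n = len(cake)
--     for d in range(1, n + 1):
--         if n % d == 0 and cake[:d] * (n // d) == cake:
--             return n // d
--     return 1
-- ===== Notes on version B (the rewrite author's own statement) =====
-- stated objective: faster
-- what changed: Instead of scanning every block size 1..n-1 and comparing all slices, B tests only the divisors of n in increasing order against a single string-repetition equality, returning n//d at the first match.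
import Mathlib
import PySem

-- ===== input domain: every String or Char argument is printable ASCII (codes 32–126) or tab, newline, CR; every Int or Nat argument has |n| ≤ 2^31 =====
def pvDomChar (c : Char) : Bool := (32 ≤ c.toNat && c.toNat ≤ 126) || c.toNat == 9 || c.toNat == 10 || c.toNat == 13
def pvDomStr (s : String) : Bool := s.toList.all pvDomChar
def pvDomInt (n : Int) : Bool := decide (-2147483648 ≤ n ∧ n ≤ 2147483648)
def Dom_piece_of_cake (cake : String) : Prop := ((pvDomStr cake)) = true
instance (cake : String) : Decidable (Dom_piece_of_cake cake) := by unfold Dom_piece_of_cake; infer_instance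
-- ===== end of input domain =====

-- B replaces A's scan over every block size (each checked slice by slice) with a
-- scan over the divisors of n only, checked by one repetition equality: faster.

-- ===== PORT A =====
-- inner for-loop over range(0, len(cake), size): isvalid stays an accumulator
def pvACheck (l : List Char) (s : Int) : Bool :=
  (PySem.List.pyRange 0 (l.length : Int) s).foldl
    (fun isvalid idx =>
      if PySem.List.slice l (some 0) (some s) ≠ PySem.List.slice l (some idx) (some (idx + s))
      then false else isvalid) true

-- outer for-loop over range(1, len(cake)) with early return
-- int(len(cake)/size): in the returning branch size divides len(cake), so the
-- float division is exact and int() equals floor division.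
def pvALoop (l : List Char) : List Int → Int
  | [] => 1
  | s :: rest =>
    if pvACheck l s then PySem.Int.floordiv (l.length : Int) s else pvALoop l rest

def piece_of_cake (cake : String) : Int :=
  pvALoop cake.toList (PySem.List.pyRange 1 (cake.toList.length : Int) 1)

-- ===== PORT B =====
-- for-loop over range(1, n+1) with early return; cake[:d] * (n // d) is
-- flatten (replicate (n//d) cake[:d])
def pvBCheck (l : List Char) (d : Int) : Bool :=
  PySem.Int.mod (l.length : Int) d == 0 &&
    (List.replicate (PySem.Int.floordiv (l.length : Int) d).toNat
        (PySem.List.slice l none (some d))).flatten == l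

def pvBLoop (l : List Char) : List Int → Int
  | [] => 1
  | d :: rest =>
    if pvBCheck l d then PySem.Int.floordiv (l.length : Int) d else pvBLoop l rest

def piece_of_cake_alt (cake : String) : Int :=
  pvBLoop cake.toList (PySem.List.pyRange 1 ((cake.toList.length : Int) + 1) 1)

-- ===== PRECONDITION & SPEC =====
def Spec_piece_of_cake (cake : String) (out : Int) : Prop := out = piece_of_cake_alt cake
instance (cake : String) (out : Int) : Decidable (Spec_piece_of_cake cake out) := by unfold Spec_piece_of_cake; infer_instance

-- ===== CLAIM (what is proved, stated in full; the proofs are below) =====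
def Claim_equal_piece_of_cake : Prop := ∀ (cake : String), Dom_piece_of_cake cake → Spec_piece_of_cake cake (piece_of_cake cake)

-- ===== LEMMAS AND PROOFS =====

-- A's inner foldl flag: true iff it starts true and no index fails
theorem pv_foldl_flag (p : Int → Prop) [DecidablePred p] :
    ∀ (xs : List Int) (b : Bool),
      (xs.foldl (fun v i => if p i then false else v) b = true) ↔
        (b = true ∧ ∀ i ∈ xs, ¬ p i) := by
  intro xs
  induction xs with
  | nil => simp
  | cons x xs ih =>
    intro b
    simp only [List.foldl_cons, ih, List.mem_cons]
    split_ifs with h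
    · constructor
      · rintro ⟨hf, -⟩; exact absurd hf (by simp)
      · rintro ⟨-, hall⟩; exact absurd (hall x (Or.inl rfl)) (not_not_intro h)
    · constructor
      · rintro ⟨hb, hall⟩
        exact ⟨hb, fun i hi => hi.elim (fun e => e ▸ h) (hall i)⟩
      · rintro ⟨hb, hall⟩
        exact ⟨hb, fun i hi => hall i (Or.inr hi)⟩

theorem pvACheck_iff_Q (l : List Char) (s : Nat) (hs : 0 < s) :
    pvACheck l (s : Int) = true ↔
      ∀ j : Nat, s ∣ j → j < l.length → (l.drop j).take s = l.take s := by
  unfold pvACheck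
  rw [pv_foldl_flag (fun idx => PySem.List.slice l (some 0) (some (s : Int)) ≠
        PySem.List.slice l (some idx) (some (idx + (s : Int))))]
  simp only [true_and, not_not]
  constructor
  · intro h j hdvd hlt
    have hmem : (j : Int) ∈ PySem.List.pyRange 0 (l.length : Int) (s : Int) := by
      rw [PySem.List.mem_pyRange_iff_of_pos (by exact_mod_cast hs)]
      exact ⟨by positivity, by exact_mod_cast hlt, by simpa using Int.natCast_dvd_natCast.mpr hdvd⟩
    have := h (j : Int) hmem
    rw [PySem.List.slice_zero_start, PySem.List.slice_to_natCast,
        PySem.List.slice_natCast_add] at this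
    simpa using this.symm
  · intro h idx hmem
    rw [PySem.List.mem_pyRange_iff_of_pos (by exact_mod_cast hs)] at hmem
    obtain ⟨h0, hlt, hdvd⟩ := hmem
    obtain ⟨j, rfl⟩ : ∃ j : Nat, idx = (j : Int) := ⟨idx.toNat, (Int.toNat_of_nonneg h0).symm⟩
    rw [PySem.List.slice_zero_start, PySem.List.slice_to_natCast,
        PySem.List.slice_natCast_add]
    have hd : s ∣ j := by
      have : (s : Int) ∣ (j : Int) := by simpa using hdvd
      exact_mod_cast this
    exact (h j hd (by exact_mod_cast hlt)).symm

theorem pv_drop_flatten_replicate (p : List Char) :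
    ∀ (k m : Nat), k ≤ m →
      ((List.replicate m p).flatten).drop (k * p.length) =
        (List.replicate (m - k) p).flatten := by
  intro k
  induction k with
  | zero => intro m _; simp
  | succ k ih =>
    intro m hk
    obtain ⟨m', rfl⟩ : ∃ m', m = m' + 1 := ⟨m - 1, by omega⟩
    rw [List.replicate_succ, List.flatten_cons, Nat.succ_mul, Nat.add_comm,
        ← List.drop_drop, List.drop_left, ih m' (by omega)]
    simp

theorem pv_rep_of_periodic (s : Nat) (hs : 1 ≤ s) :
    ∀ (m : Nat) (l : List Char), l.length = m * s →
    (∀ j : Nat, s ∣ j → j < l.length → (l.drop j).take s = l.take s) →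
    l = (List.replicate m (l.take s)).flatten := by
  intro m
  induction m with
  | zero =>
    intro l hlen _
    simp at hlen
    simp [hlen]
  | succ m ih =>
    intro l hlen hQ
    have hsn : s ≤ l.length := by rw [hlen]; nlinarith
    have hdlen : (l.drop s).length = m * s := by
      rw [List.length_drop, hlen]; ring_nf; omega
    rcases Nat.eq_zero_or_pos m with hm | hm
    · subst hm
      have : l.drop s = [] := by
        rw [← List.length_eq_zero_iff, hdlen]; simp
      conv_lhs => rw [← List.take_append_drop s l]
      rw [this]
      simp
    · have hts : (l.drop s).take s = l.take s :=
        hQ s dvd_rfl (by rw [hlen]; nlinarith)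
      have hQ' : ∀ j : Nat, s ∣ j → j < (l.drop s).length →
          ((l.drop s).drop j).take s = (l.drop s).take s := by
        intro j hd hlt
        rw [List.drop_drop, hts]
        exact hQ (s + j) (Nat.dvd_add dvd_rfl hd)
          (by rw [hlen]; rw [hdlen] at hlt; nlinarith)
      have hrec := ih (l.drop s) hdlen hQ'
      rw [hts] at hrec
      conv_lhs => rw [← List.take_append_drop s l, hrec]
      rw [List.replicate_succ, List.flatten_cons]

theorem pvBCheck_iff (l : List Char) (s : Nat) :
    pvBCheck l (s : Int) = true ↔
      l.length % s = 0 ∧ (List.replicate (l.length / s) (l.take s)).flatten = l := by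
  unfold pvBCheck
  rw [PySem.Int.mod_natCast, PySem.Int.floordiv_natCast, PySem.List.slice_to_natCast]
  simp only [Bool.and_eq_true, beq_iff_eq, Int.toNat_natCast, Nat.cast_eq_zero]

theorem pv_check_eq (l : List Char) (s : Nat) (h1 : 1 ≤ s) (h2 : s < l.length) :
    pvACheck l (s : Int) = pvBCheck l (s : Int) := by
  rw [Bool.eq_iff_iff, pvACheck_iff_Q l s h1, pvBCheck_iff l s]
  constructor
  · intro hQ
    have hmod : l.length % s = 0 := by
      by_contra hne
      have hdm : l.length / s * s + l.length % s = l.length := by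
        rw [Nat.mul_comm]; exact Nat.div_add_mod _ _
      have hlt : l.length / s * s < l.length := by
        have := Nat.mod_lt l.length h1
        omega
      have := hQ (l.length / s * s) (dvd_mul_left s (l.length / s)) hlt
      have hlen := congrArg List.length this
      simp only [List.length_take, List.length_drop] at hlen
      have h3 : l.length - l.length / s * s = l.length % s := by omega
      rw [h3] at hlen
      have := Nat.mod_lt l.length h1
      omega
    refine ⟨hmod, ?_⟩
    have hdvd : s ∣ l.length := Nat.dvd_of_mod_eq_zero hmod
    obtain ⟨m, hm⟩ := hdvd
    have hdiv : l.length / s = m := by rw [hm, Nat.mul_div_cancel_left _ h1]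
    rw [hdiv]
    exact (pv_rep_of_periodic s h1 m l (by rw [hm, Nat.mul_comm]) hQ).symm
  · rintro ⟨hmod, hrep⟩
    obtain ⟨m, hm⟩ := Nat.dvd_of_mod_eq_zero hmod
    have hdiv : l.length / s = m := by rw [hm, Nat.mul_div_cancel_left _ h1]
    rw [hdiv] at hrep
    intro j hd hlt
    obtain ⟨k, rfl⟩ := hd
    have hplen : (l.take s).length = s := by rw [List.length_take]; omega
    have hkm : k < m := by
      rw [hm] at hlt
      exact Nat.lt_of_mul_lt_mul_left hlt
    have hdrop : l.drop (s * k) = (List.replicate (m - k) (l.take s)).flatten := by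
      conv_lhs => rw [← hrep]
      rw [show s * k = k * (l.take s).length by rw [hplen, Nat.mul_comm]]
      exact pv_drop_flatten_replicate (l.take s) k m (le_of_lt hkm)
    rw [hdrop]
    obtain ⟨d, hdm⟩ : ∃ d, m - k = d + 1 := ⟨m - k - 1, by omega⟩
    rw [hdm, List.replicate_succ, List.flatten_cons]
    exact List.take_left' hplen

theorem pvBCheck_self (l : List Char) (h : 1 ≤ l.length) :
    pvBCheck l (l.length : Int) = true := by
  rw [pvBCheck_iff l l.length]
  refine ⟨Nat.mod_self _, ?_⟩
  rw [Nat.div_self h]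
  simp

theorem pv_loop_eq (l : List Char) (h : 1 ≤ l.length) :
    ∀ (xs : List Int),
    (∀ s ∈ xs, pvACheck l s = pvBCheck l s) →
    pvALoop l xs = pvBLoop l (xs ++ [(l.length : Int)]) := by
  intro xs
  induction xs with
  | nil =>
    intro _
    show pvALoop l [] = pvBLoop l [(l.length : Int)]
    unfold pvALoop pvBLoop
    rw [pvBCheck_self l h]
    simp [PySem.Int.floordiv_natCast, Nat.div_self h]
  | cons x xs ih =>
    intro hall
    show pvALoop l (x :: xs) = pvBLoop l (x :: (xs ++ [(l.length : Int)]))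
    unfold pvALoop pvBLoop
    rw [hall x (List.mem_cons_self)]
    by_cases hx : pvBCheck l x = true
    · rw [if_pos hx, if_pos hx]
    · rw [if_neg hx, if_neg hx]
      exact ih (fun s hsm => hall s (List.mem_cons_of_mem _ hsm))

-- ===== VERDICT (by name: the statement is the Claim_ definition above) =====
theorem piece_of_cake_spec : Claim_equal_piece_of_cake := by
  intro cake _
  unfold Spec_piece_of_cake piece_of_cake piece_of_cake_alt
  set l := cake.toList with hl
  by_cases h0 : l.length = 0
  · rw [h0]
    rw [show ((0 : Nat) : Int) = 0 by simp]
    rw [PySem.List.pyRange_one_eq_nil (by omega), PySem.List.pyRange_one_eq_nil (by omega)]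
    rfl
  · have h1 : 1 ≤ l.length := Nat.one_le_iff_ne_zero.mpr h0
    rw [PySem.List.pyRange_one_succ_right (by exact_mod_cast h1)]
    apply pv_loop_eq l h1
    intro s hs
    rw [PySem.List.mem_pyRange_one] at hs
    obtain ⟨hs1, hs2⟩ := hs
    obtain ⟨t, rfl⟩ : ∃ t : Nat, s = (t : Int) := ⟨s.toNat, (Int.toNat_of_nonneg (by omega)).symm⟩
    exact pv_check_eq l t (by exact_mod_cast hs1) (by exact_mod_cast hs2)
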